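-- pv_equiv track=rewrite | github.com/theTd/hermes-agent | gateway/napcat_observability/view_models.py | _derive_active_stream
-- ===== SOURCE A (Python) =====
-- from typing import Any, Dict, List, Optional, Tuple
--
-- def _derive_active_stream(events: List[Dict[str, Any]]) -> Optional[bool]:
--     active = None
--     for event in events:
--         et = event.get("event_type", "")
--         if et in ("agent.reasoning.delta", "agent.response.delta"):
--             active = True
--             continue
--         if et in (
--             "agent.response.final", "agent.response.suppressed", "gateway.turn.short_circuited",
--             "error.raised", "orchestrator.turn.completed", "orchestrator.turn.failed",
--             "orchestrator.turn.ignored", "orchestrator.child.completed",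
--             "orchestrator.child.cancelled", "orchestrator.child.failed",
--         ):
--             active = False
--     return active
-- ===== SOURCE B (Python) =====
-- # Decision table: event_type -> stream state it implies; reverse scan finds the last decisive one.
-- _DECISION = {
--     "agent.reasoning.delta": True,
--     "agent.response.delta": True,
--     "agent.response.final": False,
--     "agent.response.suppressed": False,
--     "gateway.turn.short_circuited": False,
--     "error.raised": False,
--     "orchestrator.turn.completed": False,
--     "orchestrator.turn.failed": False,
--     "orchestrator.turn.ignored": False,
--     "orchestrator.child.completed": False,
--     "orchestrator.child.cancelled": False,
--     "orchestrator.child.failed": False,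
-- }
--
-- def _derive_active_stream(events):
--     for event in reversed(events):
--         decision = _DECISION.get(event.get("event_type", ""))
--         if decision is not None:
--             return decision
--     return None
-- ===== Notes on version B (the rewrite author's own statement) =====
-- stated objective: alternative
-- what changed: Replaces the forward fold with explicit activating/deactivating membership tests by a single decision table (event_type -> bool) looked up during a reverse scan that early-returns at the last decisive event.
import Mathlib
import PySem

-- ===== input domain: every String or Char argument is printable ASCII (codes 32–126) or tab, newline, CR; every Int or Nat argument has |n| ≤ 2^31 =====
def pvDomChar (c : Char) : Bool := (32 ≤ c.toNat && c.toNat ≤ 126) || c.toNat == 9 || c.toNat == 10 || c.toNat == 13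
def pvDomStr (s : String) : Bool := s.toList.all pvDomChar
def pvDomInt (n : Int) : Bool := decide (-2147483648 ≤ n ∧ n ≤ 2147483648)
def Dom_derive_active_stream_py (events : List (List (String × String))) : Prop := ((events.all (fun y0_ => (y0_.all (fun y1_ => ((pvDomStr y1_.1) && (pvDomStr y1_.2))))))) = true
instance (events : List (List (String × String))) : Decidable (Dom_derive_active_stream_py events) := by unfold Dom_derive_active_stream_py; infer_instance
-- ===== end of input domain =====

-- B replaces A's forward accumulator loop with two membership if-chains by a
-- decision table looked up during a reverse scan with early return (objective: alternative).

-- ===== PORT A =====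
-- A: forward loop, accumulator 'active' overwritten by each decisive event.
def derive_active_stream_py (events : List (List (String × String))) : Option Bool :=
  events.foldl (fun active event =>
    let et := (PySem.Dict.mk event).getD "event_type" ""
    if et = "agent.reasoning.delta" ∨ et = "agent.response.delta" then some true
    else if et = "agent.response.final" ∨ et = "agent.response.suppressed" ∨
              et = "gateway.turn.short_circuited" ∨ et = "error.raised" ∨
              et = "orchestrator.turn.completed" ∨ et = "orchestrator.turn.failed" ∨
              et = "orchestrator.turn.ignored" ∨ et = "orchestrator.child.completed" ∨
              et = "orchestrator.child.cancelled" ∨ et = "orchestrator.child.failed" then some false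
    else active) none

-- ===== PORT B =====
-- B: decision table event_type -> implied state (Source B's _DECISION dict).
def pvDecision : PySem.Dict String Bool := PySem.Dict.mk [
  ("agent.reasoning.delta", true),
  ("agent.response.delta", true),
  ("agent.response.final", false),
  ("agent.response.suppressed", false),
  ("gateway.turn.short_circuited", false),
  ("error.raised", false),
  ("orchestrator.turn.completed", false),
  ("orchestrator.turn.failed", false),
  ("orchestrator.turn.ignored", false),
  ("orchestrator.child.completed", false),
  ("orchestrator.child.cancelled", false),
  ("orchestrator.child.failed", false)]

-- B: scan events.reverse, returning the table's verdict at the first hit.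
def derive_active_stream_py_altGo : List (List (String × String)) → Option Bool
  | [] => none
  | event :: rest =>
    match pvDecision.get? ((PySem.Dict.mk event).getD "event_type" "") with
    | some decision => some decision
    | none => derive_active_stream_py_altGo rest

def derive_active_stream_py_alt (events : List (List (String × String))) : Option Bool :=
  derive_active_stream_py_altGo events.reverse

-- ===== PRECONDITION & SPEC =====
def Spec_derive_active_stream_py (events : List (List (String × String))) (out : Option Bool) : Prop := out = derive_active_stream_py_alt events
instance (events : List (List (String × String))) (out : Option Bool) : Decidable (Spec_derive_active_stream_py events out) := by unfold Spec_derive_active_stream_py; infer_instance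

-- ===== CLAIM =====
def Claim_equal_derive_active_stream_py : Prop := ∀ (events : List (List (String × String))), Dom_derive_active_stream_py events → Spec_derive_active_stream_py events (derive_active_stream_py events)

-- ===== LEMMAS AND PROOFS =====

-- the table lookup agrees with A's two membership tests, for every string
theorem decision_get (et : String) :
    pvDecision.get? et =
      (if et = "agent.reasoning.delta" ∨ et = "agent.response.delta" then some true
       else if et = "agent.response.final" ∨ et = "agent.response.suppressed" ∨
                 et = "gateway.turn.short_circuited" ∨ et = "error.raised" ∨
                 et = "orchestrator.turn.completed" ∨ et = "orchestrator.turn.failed" ∨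
                 et = "orchestrator.turn.ignored" ∨ et = "orchestrator.child.completed" ∨
                 et = "orchestrator.child.cancelled" ∨ et = "orchestrator.child.failed" then some false
       else none) := by
  by_cases h1 : et = "agent.reasoning.delta"; · subst h1; decide
  by_cases h2 : et = "agent.response.delta"; · subst h2; decide
  by_cases h3 : et = "agent.response.final"; · subst h3; decide
  by_cases h4 : et = "agent.response.suppressed"; · subst h4; decide
  by_cases h5 : et = "gateway.turn.short_circuited"; · subst h5; decide
  by_cases h6 : et = "error.raised"; · subst h6; decide
  by_cases h7 : et = "orchestrator.turn.completed"; · subst h7; decide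
  by_cases h8 : et = "orchestrator.turn.failed"; · subst h8; decide
  by_cases h9 : et = "orchestrator.turn.ignored"; · subst h9; decide
  by_cases h10 : et = "orchestrator.child.completed"; · subst h10; decide
  by_cases h11 : et = "orchestrator.child.cancelled"; · subst h11; decide
  by_cases h12 : et = "orchestrator.child.failed"; · subst h12; decide
  simp only [pvDecision, PySem.Dict.get?_mk_cons, beq_iff_eq]
  rw [if_neg (fun h => h1 h.symm), if_neg (fun h => h2 h.symm), if_neg (fun h => h3 h.symm),
      if_neg (fun h => h4 h.symm), if_neg (fun h => h5 h.symm), if_neg (fun h => h6 h.symm),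
      if_neg (fun h => h7 h.symm), if_neg (fun h => h8 h.symm), if_neg (fun h => h9 h.symm),
      if_neg (fun h => h10 h.symm), if_neg (fun h => h11 h.symm), if_neg (fun h => h12 h.symm)]
  rw [if_neg (by tauto), if_neg (by tauto)]
  simp [PySem.Dict.get?]

theorem altGo_append_singleton (xs : List (List (String × String))) (e : List (String × String)) :
    derive_active_stream_py_altGo (xs ++ [e]) =
      (derive_active_stream_py_altGo xs).or
        (pvDecision.get? ((PySem.Dict.mk e).getD "event_type" "")) := by
  induction xs with
  | nil => simp only [List.nil_append, derive_active_stream_py_altGo, Option.none_or]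
           cases pvDecision.get? ((PySem.Dict.mk e).getD "event_type" "") <;> rfl
  | cons x t ih =>
    simp only [List.cons_append, derive_active_stream_py_altGo]
    cases pvDecision.get? ((PySem.Dict.mk x).getD "event_type" "") <;> simp [ih]

theorem foldl_eq_altGo (xs : List (List (String × String))) (acc : Option Bool) :
    xs.foldl (fun active event =>
      let et := (PySem.Dict.mk event).getD "event_type" ""
      if et = "agent.reasoning.delta" ∨ et = "agent.response.delta" then some true
      else if et = "agent.response.final" ∨ et = "agent.response.suppressed" ∨
                et = "gateway.turn.short_circuited" ∨ et = "error.raised" ∨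
                et = "orchestrator.turn.completed" ∨ et = "orchestrator.turn.failed" ∨
                et = "orchestrator.turn.ignored" ∨ et = "orchestrator.child.completed" ∨
                et = "orchestrator.child.cancelled" ∨ et = "orchestrator.child.failed" then some false
      else active) acc
    = (derive_active_stream_py_altGo xs.reverse).or acc := by
  induction xs generalizing acc with
  | nil => simp [derive_active_stream_py_altGo]
  | cons e t ih =>
    simp only [List.foldl_cons, List.reverse_cons, altGo_append_singleton, ih, Option.or_assoc]
    congr 1
    rw [decision_get]
    split_ifs <;> rfl

-- ===== VERDICT =====
theorem derive_active_stream_py_spec : Claim_equal_derive_active_stream_py := by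
  intro events _
  show _ = _
  simpa [derive_active_stream_py_alt] using foldl_eq_altGo events none
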